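-- pv_equiv track=rewrite | github.com/KrystianKrasno/vehicle_images | vehicle_images/build.py | generate_gallery_html
-- ===== SOURCE A (Python) =====
-- from collections import defaultdict
--
-- def generate_gallery_html(manifest: list[dict], series_info: dict[str, dict]) -> str:
--     """Generate an index.html string grouped by Series Family.
--
--     Args:
--         manifest: list of {code, url} dicts from build_manifest().
--         series_info: dict mapping code -> {description, family}.
--
--     Returns an HTML document as a string. Used for local sanity-checking
--     the rendered gallery; not consumed by Power BI.
--     """
--     # Group manifest entries by family
--     by_family: dict[str, list[tuple[str, str, str]]] = defaultdict(list)
--     for entry in manifest: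
--         code = entry["code"]
--         url = entry["url"]
--         info = series_info.get(code, {})
--         family = info.get("family", "Unknown")
--         description = info.get("description", code)
--         by_family[family].append((code, description, url))
--
--     # Sort families alphabetically
--     families = sorted(by_family.keys())
--
--     parts = [
--         "<!DOCTYPE html>",
--         "<html>",
--         "<head>",
--         '    <meta charset="utf-8">',
--         "    <title>Vehicle Images Gallery</title>",
--         "    <style>",
--         "        body { font-family: sans-serif; max-width: 1400px; margin: 0 auto; padding: 20px; }",
--         "        h1 { border-bottom: 2px solid #333; padding-bottom: 8px; }",
--         "        h2 { color: #555; margin-top: 32px; }",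
--         "        .group { display: flex; flex-wrap: wrap; gap: 16px; }",
--         "        figure { margin: 0; text-align: center; }",
--         "        .group img { max-width: 240px; height: auto; border: 1px solid #ccc; background: #f6f6f6; }",
--         "        figcaption { font-size: 12px; color: #666; margin-top: 4px; }",
--         "    </style>",
--         "</head>",
--         "<body>",
--         "    <h1>Vehicle Images Gallery</h1>",
--         "    <p>Sanity-check gallery generated by build.py. Not consumed by Power BI.</p>",
--     ]
--     for family in families:
--         parts.append(f"    <h2>{family}</h2>")
--         parts.append('    <div class="group">')
--         for code, description, url in sorted(by_family[family], key=lambda t: t[1]):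
--             parts.append("        <figure>")
--             parts.append(f'            <img src="{url}" alt="{description}" title="{code}">')
--             parts.append(f"            <figcaption>{description} <small>({code})</small></figcaption>")
--             parts.append("        </figure>")
--         parts.append("    </div>")
--     parts.append("</body>")
--     parts.append("</html>")
--     return "\n".join(parts)
-- ===== SOURCE B (Python) =====
-- def _row(series_info, entry):
--     code = entry["code"]
--     url = entry["url"]
--     info = series_info.get(code, {})
--     return (info.get("family", "Unknown"), info.get("description", code), code, url)
--
--
-- def generate_gallery_html(manifest: list[dict], series_info: dict[str, dict]) -> str:
--     """Flat single sort by (family, description) + one emission pass tracking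
--     the current family; no defaultdict grouping and no per-family sort."""
--     rows = [_row(series_info, entry) for entry in manifest]
--     rows.sort(key=lambda r: (r[0], r[1]))
--
--     parts = [
--         "<!DOCTYPE html>",
--         "<html>",
--         "<head>",
--         '    <meta charset="utf-8">',
--         "    <title>Vehicle Images Gallery</title>",
--         "    <style>",
--         "        body { font-family: sans-serif; max-width: 1400px; margin: 0 auto; padding: 20px; }",
--         "        h1 { border-bottom: 2px solid #333; padding-bottom: 8px; }",
--         "        h2 { color: #555; margin-top: 32px; }",
--         "        .group { display: flex; flex-wrap: wrap; gap: 16px; }",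
--         "        figure { margin: 0; text-align: center; }",
--         "        .group img { max-width: 240px; height: auto; border: 1px solid #ccc; background: #f6f6f6; }",
--         "        figcaption { font-size: 12px; color: #666; margin-top: 4px; }",
--         "    </style>",
--         "</head>",
--         "<body>",
--         "    <h1>Vehicle Images Gallery</h1>",
--         "    <p>Sanity-check gallery generated by build.py. Not consumed by Power BI.</p>",
--     ]
--     cur = None
--     for family, description, code, url in rows:
--         if family != cur:
--             if cur is not None:
--                 parts.append("    </div>")
--             parts.append(f"    <h2>{family}</h2>")
--             parts.append('    <div class="group">')
--             cur = family
--         parts.append("        <figure>")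
--         parts.append(f'            <img src="{url}" alt="{description}" title="{code}">')
--         parts.append(f"            <figcaption>{description} <small>({code})</small></figcaption>")
--         parts.append("        </figure>")
--     if cur is not None:
--         parts.append("    </div>")
--     parts.append("</body>")
--     parts.append("</html>")
--     return "\n".join(parts)
-- ===== Notes on version B (the rewrite author's own statement) =====
-- stated objective: simpler
-- what changed: B drops the defaultdict grouping and the per-family sorts: it builds one flat (family, description, code, url) row list, sorts it once by (family, description) relying on sort stability, and emits the HTML in a single pass that opens/closes a group whenever the family changes.
import Mathlib
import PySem

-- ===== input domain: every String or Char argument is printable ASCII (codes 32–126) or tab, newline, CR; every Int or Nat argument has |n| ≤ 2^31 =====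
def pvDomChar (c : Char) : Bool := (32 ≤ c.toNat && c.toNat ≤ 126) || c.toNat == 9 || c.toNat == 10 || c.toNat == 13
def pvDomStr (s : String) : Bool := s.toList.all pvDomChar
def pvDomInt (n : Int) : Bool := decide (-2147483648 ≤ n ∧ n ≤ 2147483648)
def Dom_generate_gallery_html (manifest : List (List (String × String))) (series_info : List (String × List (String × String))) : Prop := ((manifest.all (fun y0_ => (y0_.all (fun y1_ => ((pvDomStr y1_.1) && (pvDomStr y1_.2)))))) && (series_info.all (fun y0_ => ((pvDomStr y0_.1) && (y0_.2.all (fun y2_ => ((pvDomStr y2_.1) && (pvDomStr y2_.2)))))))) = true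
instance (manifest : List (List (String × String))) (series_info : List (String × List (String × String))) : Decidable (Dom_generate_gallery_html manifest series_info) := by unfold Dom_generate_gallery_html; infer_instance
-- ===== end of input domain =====

-- B replaces A's defaultdict grouping + per-family sorts by ONE stable sort of a flat row list
-- keyed (family, description) and a single emission pass tracking the current family (return value only; no mutation observable).

-- shared literal constants: the identical string literals both Pythons contain
def pvPreamble : List String := [
  "<!DOCTYPE html>",
  "<html>",
  "<head>",
  "    <meta charset=\"utf-8\">",
  "    <title>Vehicle Images Gallery</title>",
  "    <style>",
  "        body { font-family: sans-serif; max-width: 1400px; margin: 0 auto; padding: 20px; }",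
  "        h1 { border-bottom: 2px solid #333; padding-bottom: 8px; }",
  "        h2 { color: #555; margin-top: 32px; }",
  "        .group { display: flex; flex-wrap: wrap; gap: 16px; }",
  "        figure { margin: 0; text-align: center; }",
  "        .group img { max-width: 240px; height: auto; border: 1px solid #ccc; background: #f6f6f6; }",
  "        figcaption { font-size: 12px; color: #666; margin-top: 4px; }",
  "    </style>",
  "</head>",
  "<body>",
  "    <h1>Vehicle Images Gallery</h1>",
  "    <p>Sanity-check gallery generated by build.py. Not consumed by Power BI.</p>"]

-- the two header lines appended for a family, and the four figure lines appended per item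
def pvHdr (family : String) : List String :=
  ["    <h2>" ++ family ++ "</h2>", "    <div class=\"group\">"]

def pvFig (code description url : String) : List String :=
  ["        <figure>",
   "            <img src=\"" ++ url ++ "\" alt=\"" ++ description ++ "\" title=\"" ++ code ++ "\">",
   "            <figcaption>" ++ description ++ " <small>(" ++ code ++ ")</small></figcaption>",
   "        </figure>"]

-- ===== PORT A =====
-- loop body of A's grouping loop (entry["code"] / entry["url"]: KeyError excluded by Pre_, the
-- .getD "" default is never reached there)
def pvA_step (series_info : List (String × List (String × String)))
    (d : PySem.Dict String (List (String × String × String))) (entry : List (String × String)) :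
    PySem.Dict String (List (String × String × String)) :=
  let code := ((PySem.Dict.mk entry).get? "code").getD ""
  let url := ((PySem.Dict.mk entry).get? "url").getD ""
  let info : PySem.Dict String String := PySem.Dict.mk (((PySem.Dict.mk series_info).get? code).getD [])
  let family := info.getD "family" "Unknown"
  let description := info.getD "description" code
  PySem.Dict.modify d family [] (fun l => l ++ [(code, description, url)])

def generate_gallery_html (manifest : List (List (String × String))) (series_info : List (String × List (String × String))) : String :=
  let by_family := manifest.foldl (pvA_step series_info) (PySem.Dict.mk [])
  let families := PySem.List.sorted by_family.keys (fun f => f)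
  let parts := families.foldl (fun parts family =>
      let parts := parts ++ pvHdr family
      let parts := (PySem.List.sorted (by_family.getD family []) (fun t => t.2.1)).foldl
          (fun parts t => parts ++ pvFig t.1 t.2.1 t.2.2) parts
      parts ++ ["    </div>"]) pvPreamble
  PySem.Str.join "\n" (parts ++ ["</body>", "</html>"])

-- ===== PORT B =====
-- B's helper _row: (family, description, code, url) for one manifest entry
def pvRow (series_info : List (String × List (String × String))) (entry : List (String × String)) :
    String × String × String × String :=
  let code := ((PySem.Dict.mk entry).get? "code").getD ""
  let url := ((PySem.Dict.mk entry).get? "url").getD ""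
  let info : PySem.Dict String String := PySem.Dict.mk (((PySem.Dict.mk series_info).get? code).getD [])
  (info.getD "family" "Unknown", info.getD "description" code, code, url)

-- 'if cur is not None: parts.append("    </div>")'
def pvClose : Option String → List String
  | none => []
  | some _ => ["    </div>"]

-- B's loop body: state = (parts, cur)
def pvStep (st : List String × Option String) (r : String × String × String × String) :
    List String × Option String :=
  if st.2 = some r.1 then (st.1 ++ pvFig r.2.2.1 r.2.1 r.2.2.2, st.2)
  else (st.1 ++ pvClose st.2 ++ pvHdr r.1 ++ pvFig r.2.2.1 r.2.1 r.2.2.2, some r.1)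

def generate_gallery_html_alt (manifest : List (List (String × String))) (series_info : List (String × List (String × String))) : String :=
  let rows := PySem.List.sorted2 (manifest.map (pvRow series_info)) (fun r => r.1) (fun r => r.2.1)
  let st := rows.foldl pvStep (pvPreamble, none)
  PySem.Str.join "\n" (st.1 ++ pvClose st.2 ++ ["</body>", "</html>"])

-- ===== PRECONDITION & SPEC =====
-- Pre_ excludes (a) manifest entries without a "code" or "url" key, on which A raises KeyError, and
-- (b) association lists with duplicate keys inside a dict-typed argument, which no Python dict can
-- represent (a Python dict always has distinct keys).
def Pre_generate_gallery_html (manifest : List (List (String × String))) (series_info : List (String × List (String × String))) : Prop :=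
  (∀ entry ∈ manifest, "code" ∈ entry.map Prod.fst ∧ "url" ∈ entry.map Prod.fst ∧ (entry.map Prod.fst).Nodup) ∧
  (series_info.map Prod.fst).Nodup ∧ ∀ p ∈ series_info, (p.2.map Prod.fst).Nodup
instance (manifest : List (List (String × String))) (series_info : List (String × List (String × String))) : Decidable (Pre_generate_gallery_html manifest series_info) := by unfold Pre_generate_gallery_html; infer_instance

def pvWitness_generate_gallery_html : (List (List (String × String))) × (List (String × List (String × String))) :=
  ([[("code", "a1"), ("url", "u1")], [("code", "b2"), ("url", "u2")]],
   [("a1", [("description", "Alpha"), ("family", "A")])])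

def Spec_generate_gallery_html (manifest : List (List (String × String))) (series_info : List (String × List (String × String))) (out : String) : Prop := out = generate_gallery_html_alt manifest series_info
instance (manifest : List (List (String × String))) (series_info : List (String × List (String × String))) (out : String) : Decidable (Spec_generate_gallery_html manifest series_info out) := by unfold Spec_generate_gallery_html; infer_instance

-- ===== CLAIM (what is proved, stated in full; the proofs are below) =====
def Claim_equal_generate_gallery_html : Prop := ∀ (manifest : List (List (String × String))) (series_info : List (String × List (String × String))), Dom_generate_gallery_html manifest series_info → Pre_generate_gallery_html manifest series_info → Spec_generate_gallery_html manifest series_info (generate_gallery_html manifest series_info)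

-- ===== LEMMAS AND PROOFS =====

-- abbreviations for the proof layer
abbrev pvR := String × String × String × String

def pvLex (a b : pvR) : Bool :=
  decide (a.1 < b.1) || (!decide (b.1 < a.1) && decide (a.2.1 < b.2.1))

def pvTrip (r : pvR) : String × String × String := (r.2.2.1, r.2.1, r.2.2.2)

def pvFams (rows : List pvR) : List String :=
  PySem.List.sorted (PySem.Set.ofList (rows.map (fun r => r.1))) (fun f => f)

def pvBlock (rows : List pvR) (f : String) : List pvR :=
  PySem.List.sorted (rows.filter (fun r => r.1 == f)) (fun r => r.2.1)

def pvBody (rows : List pvR) (f : String) : List String :=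
  pvHdr f ++ (pvBlock rows f).flatMap (fun r => pvFig r.2.2.1 r.2.1 r.2.2.2) ++ ["    </div>"]

-- generic insertBy facts
lemma pv_insertBy_skip {α : Type} (bf : α → α → Bool) (x : α) (B rest : List α)
    (h : ∀ y ∈ B, bf x y = false) :
    PySem.List.insertBy bf x (B ++ rest) = B ++ PySem.List.insertBy bf x rest := by
  induction B with
  | nil => rfl
  | cons b B ih =>
    rw [List.cons_append]
    show (if bf x b = true then x :: b :: (B ++ rest) else b :: PySem.List.insertBy bf x (B ++ rest)) = _
    rw [h b (by simp), if_neg (by simp), ih (fun y hy => h y (by simp [hy])), List.cons_append]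

lemma pv_insertBy_within {α : Type} (bf bf' : α → α → Bool) (x : α) (B rest : List α)
    (h1 : ∀ y ∈ B, bf x y = bf' x y) (h2 : ∀ y ∈ rest, bf x y = true) :
    PySem.List.insertBy bf x (B ++ rest) = PySem.List.insertBy bf' x B ++ rest := by
  induction B with
  | nil =>
    cases rest with
    | nil => rfl
    | cons y ys =>
      show (if bf x y = true then x :: y :: ys else y :: PySem.List.insertBy bf x ys) = [x] ++ y :: ys
      rw [h2 y (by simp), if_pos rfl]; rfl
  | cons b B ih =>
    rw [List.cons_append]
    show (if bf x b = true then x :: b :: (B ++ rest) else b :: PySem.List.insertBy bf x (B ++ rest)) = _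
    rw [h1 b (by simp)]
    show _ = (if bf' x b = true then x :: b :: B else b :: PySem.List.insertBy bf' x B) ++ rest
    cases hb : bf' x b with
    | true => simp
    | false => simp [ih (fun y hy => h1 y (by simp [hy]))]

lemma pv_insertBy_map {α β : Type} (g : α → β) (bf : β → β → Bool) (bf' : α → α → Bool)
    (h : ∀ a b, bf (g a) (g b) = bf' a b) (x : α) (l : List α) :
    PySem.List.insertBy bf (g x) (l.map g) = (PySem.List.insertBy bf' x l).map g := by
  induction l with
  | nil => rfl
  | cons b l ih =>
    rw [List.map_cons]
    show (if bf (g x) (g b) = true then g x :: g b :: l.map g else g b :: PySem.List.insertBy bf (g x) (l.map g)) = _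
    rw [h x b]
    show _ = (if bf' x b = true then x :: b :: l else b :: PySem.List.insertBy bf' x l).map g
    cases hb : bf' x b with
    | true => simp
    | false => simp [ih]

lemma pv_sorted_snoc {α κ : Type} [LinearOrder κ] (l : List α) (x : α) (key : α → κ) :
    PySem.List.sorted (l ++ [x]) key =
      PySem.List.insertBy (fun a b => decide (key a < key b)) x (PySem.List.sorted l key) := by
  rw [PySem.List.sorted_eq_foldl_insertBy, PySem.List.sorted_eq_foldl_insertBy, List.foldl_append]
  rfl

lemma pv_sorted2_snoc (l : List pvR) (x : pvR) :
    PySem.List.sorted2 (l ++ [x]) (fun r => r.1) (fun r => r.2.1) =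
      PySem.List.insertBy pvLex x (PySem.List.sorted2 l (fun r => r.1) (fun r => r.2.1)) := by
  have h : ∀ m : List pvR, PySem.List.sorted2 m (fun r => r.1) (fun r => r.2.1) =
      m.foldl (fun acc y => PySem.List.insertBy pvLex y acc) [] := fun m => rfl
  rw [h, h, List.foldl_append, List.foldl_cons, List.foldl_nil]

lemma pv_sorted_map {α β κ : Type} [LinearOrder κ] (g : α → β) (key : β → κ) (l : List α) :
    PySem.List.sorted (l.map g) key = (PySem.List.sorted l (fun a => key (g a))).map g := by
  induction l using List.reverseRecOn with
  | nil => rfl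
  | append_singleton l x ih =>
    rw [List.map_append, List.map_singleton, pv_sorted_snoc, pv_sorted_snoc, ih,
      pv_insertBy_map g _ _ (fun a b => rfl)]

lemma pv_mem_block {rows : List pvR} {f : String} {y : pvR} (h : y ∈ pvBlock rows f) : y.1 = f := by
  rw [pvBlock, PySem.List.mem_sorted] at h
  exact by simpa using (List.mem_filter.1 h).2

lemma pv_fams_pairwise (rows : List pvR) : (pvFams rows).Pairwise (· < ·) :=
  PySem.List.sorted_ofList_pairwise_lt _

lemma pv_mem_fams {rows : List pvR} {f : String} : f ∈ pvFams rows ↔ f ∈ rows.map (fun r => r.1) := by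
  rw [pvFams, PySem.List.mem_sorted, PySem.Set.mem_ofList]

lemma pv_block_ne_nil {rows : List pvR} {f : String} (h : f ∈ pvFams rows) : pvBlock rows f ≠ [] := by
  rw [pvBlock, Ne, PySem.List.sorted_eq_nil_iff, List.filter_eq_nil_iff]
  push Not
  obtain ⟨r, hr, hrf⟩ := List.mem_map.1 (pv_mem_fams.1 h)
  exact ⟨r, hr, by simp [hrf]⟩

lemma pv_lex_of_lt {r y : pvR} (h : r.1 < y.1) : pvLex r y = true := by
  simp [pvLex, h]

lemma pv_lex_of_gt {r y : pvR} (h : y.1 < r.1) : pvLex r y = false := by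
  simp [pvLex, h, lt_asymm h]

lemma pv_lex_of_eq {r y : pvR} (h : y.1 = r.1) : pvLex r y = decide (r.2.1 < y.2.1) := by
  simp [pvLex, h]

-- inserting a row whose family is already among fs
lemma pv_ins_flat_mem (r : pvR) (bk : String → List pvR) :
    ∀ fs : List String, fs.Pairwise (· < ·) → (∀ f ∈ fs, ∀ y ∈ bk f, y.1 = f) → r.1 ∈ fs →
    PySem.List.insertBy pvLex r (fs.flatMap bk) =
      fs.flatMap (fun f => if f = r.1 then PySem.List.insertBy (fun a b => decide (a.2.1 < b.2.1)) r (bk f) else bk f) := by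
  intro fs
  induction fs with
  | nil => intro _ _ h; cases h
  | cons f0 fs ih =>
    intro hp hfam hmem
    have hp' := (List.pairwise_cons.1 hp)
    rw [List.flatMap_cons, List.flatMap_cons]
    by_cases hf : f0 = r.1
    · rw [if_pos hf]
      rw [pv_insertBy_within pvLex (fun a b => decide (a.2.1 < b.2.1)) r (bk f0) _
        (fun y hy => pv_lex_of_eq ((hfam f0 (by simp) y hy).trans hf))
        (fun y hy => by
          obtain ⟨f', hf', hyf'⟩ := List.mem_flatMap.1 hy
          have h1 : r.1 < f' := hf ▸ hp'.1 f' hf'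
          exact pv_lex_of_lt (((hfam f' (by simp [hf']) y hyf').symm ▸ h1) : r.1 < y.1))]
      congr 1
      refine (List.flatMap_congr ?_).symm
      intro f hffs
      have h1 : r.1 < f := hf ▸ hp'.1 f hffs
      exact if_neg (fun hc => absurd (hc ▸ h1) (lt_irrefl r.1))
    · have hmem' : r.1 ∈ fs := by
        rcases List.mem_cons.1 hmem with h | h
        · exact absurd h.symm hf
        · exact h
      have hf0lt : f0 < r.1 := hp'.1 _ hmem'
      rw [if_neg hf]
      rw [pv_insertBy_skip pvLex r (bk f0) _
        (fun y hy => pv_lex_of_gt (((hfam f0 (by simp) y hy).symm ▸ hf0lt) : y.1 < r.1))]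
      rw [ih hp'.2 (fun f hffs => hfam f (by simp [hffs])) hmem']

-- inserting a row with a new family
lemma pv_ins_flat_new (r : pvR) (bk : String → List pvR) :
    ∀ fs : List String, fs.Pairwise (· < ·) → (∀ f ∈ fs, ∀ y ∈ bk f, y.1 = f) → r.1 ∉ fs →
    PySem.List.insertBy pvLex r (fs.flatMap bk) =
      (PySem.List.insertBy (fun a b => decide (a < b)) r.1 fs).flatMap
        (fun f => if f = r.1 then [r] else bk f) := by
  intro fs
  induction fs with
  | nil => intro _ _ _; simp [PySem.List.insertBy]
  | cons f0 fs ih =>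
    intro hp hfam hmem
    have hp' := (List.pairwise_cons.1 hp)
    have hne : f0 ≠ r.1 := fun hc => hmem (by simp [hc])
    rw [List.flatMap_cons]
    show PySem.List.insertBy pvLex r (bk f0 ++ fs.flatMap bk) = _
    by_cases hlt : r.1 < f0
    · rw [← List.nil_append (bk f0 ++ fs.flatMap bk)]
      rw [pv_insertBy_within pvLex pvLex r [] _ (fun y hy => by cases hy)
        (fun y hy => by
          rcases List.mem_append.1 hy with h | h
          · exact pv_lex_of_lt (((hfam f0 (by simp) y h).symm ▸ hlt) : r.1 < y.1)
          · obtain ⟨f', hf', hyf'⟩ := List.mem_flatMap.1 h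
            exact pv_lex_of_lt (((hfam f' (by simp [hf']) y hyf').symm ▸
              lt_trans hlt (hp'.1 f' hf')) : r.1 < y.1))]
      show [r] ++ _ = (if decide (r.1 < f0) = true then r.1 :: f0 :: fs else
        f0 :: PySem.List.insertBy (fun a b => decide (a < b)) r.1 fs).flatMap _
      rw [if_pos (by simpa using hlt)]
      simp only [List.flatMap_cons, if_neg hne]
      rw [List.flatMap_congr (l := fs) (f := fun f => if f = r.1 then [r] else bk f)
        (g := bk) (fun f hffs => by
          have h1 : r.1 < f := lt_trans hlt (hp'.1 f hffs)
          exact if_neg (fun hc => absurd (hc ▸ h1) (lt_irrefl r.1)))]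
      rfl
    · have hgt : f0 < r.1 := lt_of_le_of_ne (not_lt.1 hlt) hne
      rw [pv_insertBy_skip pvLex r (bk f0) _
        (fun y hy => pv_lex_of_gt (((hfam f0 (by simp) y hy).symm ▸ hgt) : y.1 < r.1))]
      rw [ih hp'.2 (fun f hffs => hfam f (by simp [hffs])) (fun hc => hmem (by simp [hc]))]
      show _ = (if decide (r.1 < f0) = true then r.1 :: f0 :: fs else
        f0 :: PySem.List.insertBy (fun a b => decide (a < b)) r.1 fs).flatMap _
      rw [if_neg (by simpa using hlt)]
      rw [List.flatMap_cons, if_neg hne]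

lemma pv_ofList_snoc_mem {l : List String} {x : String} (h : x ∈ l) :
    PySem.Set.ofList (l ++ [x]) = PySem.Set.ofList l := by
  rw [PySem.Set.ofList, PySem.Set.ofList, List.foldl_append, List.foldl_cons, List.foldl_nil]
  show PySem.Set.add (PySem.Set.ofList l) x = _
  rw [PySem.Set.add, if_pos (show (PySem.Set.ofList l).contains x = true from
    List.elem_eq_true_of_mem ((PySem.Set.mem_ofList l x).2 h))]
  rfl

lemma pv_ofList_snoc_new {l : List String} {x : String} (h : x ∉ l) :
    PySem.Set.ofList (l ++ [x]) = PySem.Set.ofList l ++ [x] := by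
  rw [PySem.Set.ofList, PySem.Set.ofList, List.foldl_append, List.foldl_cons, List.foldl_nil]
  show PySem.Set.add (PySem.Set.ofList l) x = _
  rw [PySem.Set.add, if_neg (show ¬((PySem.Set.ofList l).contains x = true) from fun hc =>
    h ((PySem.Set.mem_ofList l x).1 (List.mem_of_elem_eq_true hc)))]
  rfl

-- the stable-sort decomposition: one lexicographic sort = sorted families, each group sorted by description
lemma pv_decomp (rows : List pvR) :
    PySem.List.sorted2 rows (fun r => r.1) (fun r => r.2.1) = (pvFams rows).flatMap (pvBlock rows) := by
  induction rows using List.reverseRecOn with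
  | nil => rfl
  | append_singleton rs r ih =>
    have hblock : ∀ f, pvBlock (rs ++ [r]) f =
        if f = r.1 then PySem.List.insertBy (fun a b => decide (a.2.1 < b.2.1)) r (pvBlock rs f)
        else pvBlock rs f := by
      intro f
      rw [pvBlock, pvBlock, List.filter_append]
      by_cases hf : f = r.1
      · have h1 : List.filter (fun x => x.1 == f) [r] = [r] := by simp [hf]
        rw [h1, if_pos hf, pv_sorted_snoc]
      · have h1 : List.filter (fun x => x.1 == f) [r] = [] := by
          simp only [List.filter_cons, List.filter_nil, beq_iff_eq]
          rw [if_neg (fun hc => hf (by rw [hc]))]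
        rw [h1, if_neg hf, List.append_nil]
    by_cases hmem : r.1 ∈ rs.map (fun x => x.1)
    · have hfams : pvFams (rs ++ [r]) = pvFams rs := by
        rw [pvFams, pvFams, List.map_append, List.map_singleton, pv_ofList_snoc_mem hmem]
      rw [pv_sorted2_snoc, ih, hfams,
        pv_ins_flat_mem r (pvBlock rs) (pvFams rs) (pv_fams_pairwise rs)
          (fun f _ y hy => pv_mem_block hy) (pv_mem_fams.2 hmem)]
      exact List.flatMap_congr (fun f _ => (hblock f).symm)
    · have hb0 : pvBlock rs r.1 = [] := by
        rw [pvBlock, PySem.List.sorted_eq_nil_iff, List.filter_eq_nil_iff]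
        intro x hx
        simp only [beq_iff_eq]
        exact fun hc => hmem (List.mem_map.2 ⟨x, hx, hc⟩)
      have hfams : pvFams (rs ++ [r]) =
          PySem.List.insertBy (fun a b => decide (a < b)) r.1 (pvFams rs) := by
        rw [pvFams, pvFams, List.map_append, List.map_singleton, pv_ofList_snoc_new hmem,
          pv_sorted_snoc]
      rw [pv_sorted2_snoc, ih, hfams,
        pv_ins_flat_new r (pvBlock rs) (pvFams rs) (pv_fams_pairwise rs)
          (fun f _ y hy => pv_mem_block hy) (fun hc => hmem (pv_mem_fams.1 hc))]
      refine List.flatMap_congr (fun f _ => ?_)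
      by_cases hf : f = r.1
      · rw [if_pos hf, hblock f, if_pos hf, hf, hb0]
        rfl
      · rw [if_neg hf, hblock f, if_neg hf]

-- A's side: the grouped dict characterized
lemma pv_A_parts (manifest : List (List (String × String))) (series_info : List (String × List (String × String))) :
    generate_gallery_html manifest series_info =
      PySem.Str.join "\n" (pvPreamble ++
        (pvFams (manifest.map (pvRow series_info))).flatMap (pvBody (manifest.map (pvRow series_info))) ++
        ["</body>", "</html>"]) := by
  simp only [generate_gallery_html]
  have hdict : manifest.foldl (pvA_step series_info) (PySem.Dict.mk []) =
      ((manifest.map (pvRow series_info)).map (fun r => (r.1, pvTrip r))).foldl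
        (fun d p => PySem.Dict.modify d p.1 [] (fun l => l ++ [p.2])) (PySem.Dict.mk []) := by
    rw [List.map_map, List.foldl_map]
    exact PySem.List.foldl_congr_mem _ _ _ _ (fun acc x _ => rfl)
  rw [hdict]
  have hget : ∀ f, (((manifest.map (pvRow series_info)).map (fun r => (r.1, pvTrip r))).foldl
      (fun d p => PySem.Dict.modify d p.1 [] (fun l => l ++ [p.2])) (PySem.Dict.mk [])).getD f [] =
      ((manifest.map (pvRow series_info)).filter (fun r => r.1 == f)).map pvTrip := by
    intro f
    rw [PySem.Dict.getD_foldl_modify_append, List.filter_map, List.map_map]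
    rfl
  have hkeys : (((manifest.map (pvRow series_info)).map (fun r => (r.1, pvTrip r))).foldl
      (fun d p => PySem.Dict.modify d p.1 [] (fun l => l ++ [p.2])) (PySem.Dict.mk [])).keys =
      PySem.Set.ofList ((manifest.map (pvRow series_info)).map (fun r => r.1)) := by
    have h := PySem.Dict.keys_foldl_modify_key
      ((manifest.map (pvRow series_info)).map (fun r => (r.1, pvTrip r)))
      (fun p => p.1) ([] : List (String × String × String))
      (fun _ p => fun l => l ++ [p.2]) (PySem.Dict.mk [])
    rw [h, List.map_map]
    rfl
  simp only [hget, hkeys]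
  have hinner : ∀ (parts : List String) (f : String),
      (PySem.List.sorted (((manifest.map (pvRow series_info)).filter (fun r => r.1 == f)).map pvTrip)
          (fun t => t.2.1)).foldl (fun parts t => parts ++ pvFig t.1 t.2.1 t.2.2) (parts ++ pvHdr f) ++
        ["    </div>"] = parts ++ pvBody (manifest.map (pvRow series_info)) f := by
    intro parts f
    rw [pv_sorted_map pvTrip (fun t => t.2.1), PySem.List.foldl_append_eq_flatMap, List.flatMap_map]
    simp only [pvBody, pvBlock, pvTrip, List.append_assoc]
  rw [PySem.List.foldl_congr_mem _ _
    (fun parts f => parts ++ pvBody (manifest.map (pvRow series_info)) f) _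
    (fun parts f _ => hinner parts f)]
  rw [PySem.List.foldl_append_eq_flatMap]
  show PySem.Str.join "\n" ((pvPreamble ++ _) ++ _) = _
  simp only [pvFams, List.append_assoc]

-- B's side: the emission loop over a block of one family
lemma pv_emit_same (f : String) :
    ∀ (B : List pvR) (acc : List String), (∀ y ∈ B, y.1 = f) →
    B.foldl pvStep (acc, some f) = (acc ++ B.flatMap (fun r => pvFig r.2.2.1 r.2.1 r.2.2.2), some f) := by
  intro B
  induction B with
  | nil => intro acc _; simp
  | cons b B ih =>
    intro acc h
    rw [List.foldl_cons]
    have hs : pvStep (acc, some f) b = (acc ++ pvFig b.2.2.1 b.2.1 b.2.2.2, some f) := by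
      have hb : b.1 = f := h b (by simp)
      rw [pvStep, if_pos (show (Prod.mk acc (some f)).2 = some b.1 by rw [hb])]
    rw [hs, ih _ (fun y hy => h y (by simp [hy]))]
    simp [List.append_assoc]

lemma pv_emit_block (f : String) (B : List pvR) (acc : List String) (cur : Option String)
    (hne : B ≠ []) (hf : ∀ y ∈ B, y.1 = f) (hcur : cur ≠ some f) :
    B.foldl pvStep (acc, cur) =
      (acc ++ pvClose cur ++ pvHdr f ++ B.flatMap (fun r => pvFig r.2.2.1 r.2.1 r.2.2.2), some f) := by
  cases B with
  | nil => exact absurd rfl hne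
  | cons b B =>
    have hb : b.1 = f := hf b (by simp)
    rw [List.foldl_cons]
    have hs : pvStep (acc, cur) b =
        (acc ++ pvClose cur ++ pvHdr f ++ pvFig b.2.2.1 b.2.1 b.2.2.2, some f) := by
      rw [pvStep, if_neg (show ¬((acc, cur).2 = some b.1) by rw [hb]; exact hcur)]
      rw [hb]
    rw [hs, pv_emit_same f B _ (fun y hy => hf y (by simp [hy]))]
    simp [List.append_assoc]

lemma pv_emit_all (bk : String → List pvR) :
    ∀ fs : List String, fs.Pairwise (· < ·) → (∀ f ∈ fs, bk f ≠ [] ∧ ∀ y ∈ bk f, y.1 = f) →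
    ∀ (acc : List String) (cur : Option String), (∀ f ∈ fs, cur ≠ some f) →
    (((fs.flatMap bk).foldl pvStep (acc, cur)).1 ++ pvClose ((fs.flatMap bk).foldl pvStep (acc, cur)).2) =
      acc ++ pvClose cur ++ fs.flatMap (fun f => pvHdr f ++ (bk f).flatMap (fun r => pvFig r.2.2.1 r.2.1 r.2.2.2) ++ ["    </div>"]) := by
  intro fs
  induction fs with
  | nil => intro _ _ acc cur _; simp
  | cons f0 fs ih =>
    intro hp hbk acc cur hcur
    have hp' := List.pairwise_cons.1 hp
    rw [List.flatMap_cons, List.foldl_append]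
    rw [pv_emit_block f0 (bk f0) acc cur (hbk f0 (by simp)).1 (hbk f0 (by simp)).2 (hcur f0 (by simp))]
    rw [ih hp'.2 (fun f hf => hbk f (by simp [hf])) _ (some f0)
      (fun f hf hc => absurd (Option.some.inj hc) (ne_of_lt (hp'.1 f hf)))]
    simp [pvClose, List.append_assoc]

lemma pv_B_parts (manifest : List (List (String × String))) (series_info : List (String × List (String × String))) :
    generate_gallery_html_alt manifest series_info =
      PySem.Str.join "\n" (pvPreamble ++
        (pvFams (manifest.map (pvRow series_info))).flatMap (pvBody (manifest.map (pvRow series_info))) ++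
        ["</body>", "</html>"]) := by
  simp only [generate_gallery_html_alt]
  rw [pv_decomp]
  have hemit := pv_emit_all (pvBlock (manifest.map (pvRow series_info)))
      (pvFams (manifest.map (pvRow series_info)))
      (pv_fams_pairwise (manifest.map (pvRow series_info)))
      (fun f hf => ⟨pv_block_ne_nil hf, fun y hy => pv_mem_block hy⟩)
      pvPreamble none (fun f _ hc => by cases hc)
  rw [hemit]
  simp only [pvClose, List.append_assoc, List.append_nil]
  congr 1

-- ===== VERDICT (by name: the statement is the Claim_ definition above) =====
theorem generate_gallery_html_spec : Claim_equal_generate_gallery_html := by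
  intro manifest series_info _ _
  unfold Spec_generate_gallery_html
  rw [pv_A_parts, pv_B_parts]
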